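-- pv_equiv track=rewrite | github.com/14lclark/AdventOfCode | 2022/day8.py | bottom_visible
-- ===== SOURCE A (Python) =====
-- def bottom_visible(grid: "list[list[int]]") -> list:
--     visible = []
--     width = len(grid[0])
--     height = len(grid)
--     for col in range(width):
--         highest = -1
--         for row in range(height - 1, -1, -1):
--             if grid[row][col] > highest:
--                 visible.append((row,col))
--                 highest = grid[row][col]
--     return visible
-- ===== SOURCE B (Python) =====
-- def bottom_visible(grid: "list[list[int]]") -> list:
--     height = len(grid)
--     return [(row, col)
--             for col in range(len(grid[0]))
--             for row in range(height - 1, -1, -1)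
--             if grid[row][col] > max([-1] + [grid[r][col] for r in range(row + 1, height)])]
-- ===== Notes on version B (the rewrite author's own statement) =====
-- stated objective: simpler
-- what changed: Replaces the running-maximum accumulator and explicit append loop with a single comprehension that, for each cell, directly rescans the cells below it in the column and keeps the cell iff it exceeds max([-1] + below).
import Mathlib
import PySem

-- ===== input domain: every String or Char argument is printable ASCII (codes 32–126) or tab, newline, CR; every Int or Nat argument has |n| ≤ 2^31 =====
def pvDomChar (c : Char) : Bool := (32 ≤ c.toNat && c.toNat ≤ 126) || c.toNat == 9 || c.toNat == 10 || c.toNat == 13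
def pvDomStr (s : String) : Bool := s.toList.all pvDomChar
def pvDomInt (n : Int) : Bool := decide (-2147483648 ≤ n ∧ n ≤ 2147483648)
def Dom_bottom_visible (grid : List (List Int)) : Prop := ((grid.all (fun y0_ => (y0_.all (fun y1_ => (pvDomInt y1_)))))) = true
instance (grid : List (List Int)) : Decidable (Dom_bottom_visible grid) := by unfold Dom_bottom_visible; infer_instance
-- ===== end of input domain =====

-- B replaces A's running-maximum accumulator with a per-cell rescan of the column below,
-- written as one comprehension; simpler decomposition, same results (not faster).


-- ===== PORT A =====
-- grid[row][col]: row and col come from range(...) so are nonnegative and (under Pre_) in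
-- range; List.getD with Nat index is exact there.
def bottom_visible (grid : List (List Int)) : List (Int × Int) :=
  let width := (grid.headD []).length        -- len(grid[0])  (Pre_ excludes the empty grid)
  let height := grid.length
  (List.range width).foldl (fun visible col =>
    (((List.range height).reverse).foldl     -- range(height-1, -1, -1)
      (fun (st : List (Int × Int) × Int) row =>
        if (grid.getD row []).getD col 0 > st.2 then
          (st.1 ++ [((row : Int), (col : Int))], (grid.getD row []).getD col 0)
        else st)
      (visible, -1)).1) []

-- ===== PORT B =====
-- the comprehension: flatMap over cols, filterMap over descending rows;
-- below.foldl max (-1) is exactly Python's max([-1] + below).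
def bottom_visible_alt (grid : List (List Int)) : List (Int × Int) :=
  let height := grid.length
  (List.range (grid.headD []).length).flatMap (fun col =>
    ((List.range height).reverse).filterMap (fun row =>
      let below := ((List.range height).drop (row + 1)).map
        (fun r => (grid.getD r []).getD col 0)   -- [grid[r][col] for r in range(row+1, height)]
      if (grid.getD row []).getD col 0 > below.foldl max (-1) then
        some ((row : Int), (col : Int))
      else none))

-- ===== PRECONDITION & SPEC =====
-- Pre_ excludes exactly the inputs where the Python A raises IndexError: the empty grid
-- (grid[0]) and ragged grids with some row shorter than the first (grid[row][col]).
def Pre_bottom_visible (grid : List (List Int)) : Prop :=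
  grid ≠ [] ∧ ∀ row ∈ grid, (grid.headD []).length ≤ row.length
instance (grid : List (List Int)) : Decidable (Pre_bottom_visible grid) := by
  unfold Pre_bottom_visible; infer_instance
def pvWitness_bottom_visible : List (List Int) := [[1, 2], [3, 0]]

def Spec_bottom_visible (grid : List (List Int)) (out : List (Int × Int)) : Prop := out = bottom_visible_alt grid
instance (grid : List (List Int)) (out : List (Int × Int)) : Decidable (Spec_bottom_visible grid out) := by unfold Spec_bottom_visible; infer_instance

-- ===== CLAIM (what is proved, stated in full; the proofs are below) =====
def Claim_equal_bottom_visible : Prop := ∀ (grid : List (List Int)), Dom_bottom_visible grid → Pre_bottom_visible grid → Spec_bottom_visible grid (bottom_visible grid)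

-- ===== LEMMAS AND PROOFS =====

-- the cell at (r, col), and the max of the cells strictly below row k (with sentinel -1)
def pvCell (grid : List (List Int)) (col r : Nat) : Int := (grid.getD r []).getD col 0
def pvMaxBelow (grid : List (List Int)) (col height k : Nat) : Int :=
  (((List.range height).drop k).map (pvCell grid col)).foldl max (-1)

lemma pvMaxBelow_succ (grid : List (List Int)) (col height k : Nat) (hk : k < height) :
    pvMaxBelow grid col height k = max (pvCell grid col k) (pvMaxBelow grid col height (k + 1)) := by
  unfold pvMaxBelow
  rw [List.drop_eq_getElem_cons (by simpa using hk)]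
  simp only [List.getElem_range, List.map_cons, List.foldl_cons]
  rw [max_comm (-1) (pvCell grid col k), List.foldl_assoc]

lemma pv_inner (grid : List (List Int)) (col : Nat) (height : Nat) :
    ∀ (k : Nat), k ≤ height → ∀ (acc : List (Int × Int)),
    (((List.range k).reverse).foldl
      (fun (st : List (Int × Int) × Int) row =>
        if (grid.getD row []).getD col 0 > st.2 then
          (st.1 ++ [((row : Int), (col : Int))], (grid.getD row []).getD col 0)
        else st)
      (acc, pvMaxBelow grid col height k)).1
    = acc ++ ((List.range k).reverse).filterMap (fun row =>
        if (grid.getD row []).getD col 0 >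
            (((List.range height).drop (row + 1)).map
              (fun r => (grid.getD r []).getD col 0)).foldl max (-1) then
          some ((row : Int), (col : Int))
        else none) := by
  intro k
  induction k with
  | zero => intro _ acc; simp
  | succ k ih =>
    intro hk acc
    have hmax := pvMaxBelow_succ grid col height k (by omega)
    have hbelow : (((List.range height).drop (k + 1)).map
        (fun r => (grid.getD r []).getD col 0)).foldl max (-1)
        = pvMaxBelow grid col height (k + 1) := rfl
    rw [List.range_succ, List.reverse_append]
    simp only [List.reverse_singleton, List.singleton_append, List.foldl_cons,
      List.filterMap_cons, hbelow]
    by_cases h : (grid.getD k []).getD col 0 > pvMaxBelow grid col height (k + 1)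
    · rw [if_pos h, if_pos h]
      have h2 : (grid.getD k []).getD col 0 = pvMaxBelow grid col height k := by
        rw [hmax]; exact (max_eq_left h.le).symm
      rw [h2, ih (by omega)]
      simp
    · rw [if_neg h, if_neg h]
      have h2 : pvMaxBelow grid col height (k + 1) = pvMaxBelow grid col height k := by
        rw [hmax]; exact (max_eq_right (not_lt.mp h)).symm
      rw [h2, ih (by omega)]

-- ===== VERDICT (by name: the statement is the Claim_ definition above) =====
theorem bottom_visible_spec : Claim_equal_bottom_visible := by
  intro grid _ _
  unfold Spec_bottom_visible bottom_visible bottom_visible_alt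
  dsimp only
  have hinner : ∀ (col : Nat) (acc : List (Int × Int)),
      (((List.range grid.length).reverse).foldl
        (fun (st : List (Int × Int) × Int) row =>
          if (grid.getD row []).getD col 0 > st.2 then
            (st.1 ++ [((row : Int), (col : Int))], (grid.getD row []).getD col 0)
          else st)
        (acc, -1)).1
      = acc ++ ((List.range grid.length).reverse).filterMap (fun row =>
          if (grid.getD row []).getD col 0 >
              (((List.range grid.length).drop (row + 1)).map
                (fun r => (grid.getD r []).getD col 0)).foldl max (-1) then
            some ((row : Int), (col : Int))
          else none) := by
    intro col acc
    have hmb : pvMaxBelow grid col grid.length grid.length = -1 := by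
      simp [pvMaxBelow, List.drop_eq_nil_of_le]
    have h := pv_inner grid col grid.length grid.length le_rfl acc
    rw [hmb] at h
    exact h
  have hfun : (fun (visible : List (Int × Int)) (col : Nat) =>
      (((List.range grid.length).reverse).foldl
        (fun (st : List (Int × Int) × Int) row =>
          if (grid.getD row []).getD col 0 > st.2 then
            (st.1 ++ [((row : Int), (col : Int))], (grid.getD row []).getD col 0)
          else st)
        (visible, -1)).1)
      = (fun (visible : List (Int × Int)) (col : Nat) =>
          visible ++ ((List.range grid.length).reverse).filterMap (fun row =>
            if (grid.getD row []).getD col 0 >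
                (((List.range grid.length).drop (row + 1)).map
                  (fun r => (grid.getD r []).getD col 0)).foldl max (-1) then
              some ((row : Int), (col : Int))
            else none)) := by
    funext acc col
    exact hinner col acc
  rw [hfun, PySem.List.foldl_append_eq_flatMap, List.nil_append]
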